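-- pv_equiv track=rewrite | github.com/kimsh8337/daliy-coding | 연습/20.09/문제/N1.py | solution
-- ===== SOURCE A (Python) =====
-- def solution(m,k):
--     answer = ''
--     arr = []
--     check = []
--
--     for i in range(len(m)):
--         arr.append(m[i])
--
--     for i in range(len(k)):
--         check.append(k[i])
--
--
--     num = 0
--     flag = 0
--     while(num < len(k)):
--         for i in range(flag, len(arr)):
--             if arr[i] == check[num]:
--                 arr.pop(i)
--                 break
--             else:
--                 flag += 1
--                 continue
--         num += 1
--
--     answer = ''.join(arr)
--     return answer
-- ===== SOURCE B (Python) =====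
-- def solution(m, k):
--     out = []
--     j = 0
--     for c in m:
--         if j < len(k) and c == k[j]:
--             j += 1
--         else:
--             out.append(c)
--     return ''.join(out)
-- ===== Notes on version B (the rewrite author's own statement) =====
-- stated objective: faster
-- what changed: Replaced the per-k-char forward rescans with O(n) list pops by a single two-pointer pass over m that advances an index into k and builds the output once.
import Mathlib
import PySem

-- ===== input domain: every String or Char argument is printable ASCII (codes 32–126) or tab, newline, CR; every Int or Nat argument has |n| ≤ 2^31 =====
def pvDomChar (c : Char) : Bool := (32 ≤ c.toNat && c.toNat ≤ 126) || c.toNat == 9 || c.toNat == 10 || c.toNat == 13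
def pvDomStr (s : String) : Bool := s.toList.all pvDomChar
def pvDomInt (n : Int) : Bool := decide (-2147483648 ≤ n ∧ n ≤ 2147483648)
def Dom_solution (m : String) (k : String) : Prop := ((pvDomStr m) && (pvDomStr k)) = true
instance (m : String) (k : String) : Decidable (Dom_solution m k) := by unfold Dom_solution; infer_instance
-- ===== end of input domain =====

-- B replaces A's per-k-char rescans with O(n) pops by one two-pointer pass over m (faster).

-- ===== PORT A =====
-- the inner 'for i in range(flag, len(arr))' loop of A: i and flag both advance on a
-- mismatch; on a match arr.pop(i) is the take/drop splice and the loop breaks.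
def solutionInnerA (c : Char) (arr : List Char) (i flag : Nat) : List Char × Nat :=
  if h : i < arr.length then
    if arr[i] = c then (arr.take i ++ arr.drop (i + 1), flag)   -- arr.pop(i); break
    else solutionInnerA c arr (i + 1) (flag + 1)
  else (arr, flag)
termination_by arr.length - i

def solution (m : String) (k : String) : String :=
  let arr := m.toList          -- for i in range(len(m)): arr.append(m[i])
  let check := k.toList        -- for i in range(len(k)): check.append(k[i])
  -- while num < len(k): run the inner for-loop over state (arr, flag)
  let st := check.foldl (fun (s : List Char × Nat) ch => solutionInnerA ch s.1 s.2 s.2) (arr, 0)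
  String.mk st.1               -- ''.join(arr)

-- ===== PORT B =====
def solution_alt (m : String) (k : String) : String :=
  let kl := k.toList
  let st := m.toList.foldl
    (fun (s : List Char × Nat) c =>
      if s.2 < kl.length ∧ c = kl.getD s.2 ' ' then (s.1, s.2 + 1)   -- j += 1 (skip c)
      else (s.1 ++ [c], s.2))                                        -- out.append(c)
    ([], 0)
  String.mk st.1               -- ''.join(out)

-- ===== PRECONDITION & SPEC =====
def Spec_solution (m : String) (k : String) (out : String) : Prop := out = solution_alt m k
instance (m : String) (k : String) (out : String) : Decidable (Spec_solution m k out) := by unfold Spec_solution; infer_instance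

-- ===== CLAIM (what is proved, stated in full; the proofs are below) =====
def Claim_equal_solution : Prop := ∀ (m : String) (k : String), Dom_solution m k → Spec_solution m k (solution m k)

-- ===== LEMMAS AND PROOFS =====

-- reference function: greedily delete the chars of ks as a subsequence of ms
def gDel : List Char → List Char → List Char
  | ms, [] => ms
  | [], _ :: _ => []
  | c :: ms, kc :: ks => if c = kc then gDel ms ks else c :: gDel ms (kc :: ks)

-- position of the first occurrence of c (= length if absent) and the list with it removed
def posF (c : Char) : List Char → Nat
  | [] => 0
  | x :: xs => if x = c then 0 else posF c xs + 1

def remF (c : Char) : List Char → List Char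
  | [] => []
  | x :: xs => if x = c then xs else x :: remF c xs

theorem gDel_nil (ks : List Char) : gDel [] ks = [] := by
  cases ks <;> simp [gDel]

theorem posF_le (c : Char) (l : List Char) : posF c l ≤ (remF c l).length := by
  induction l with
  | nil => simp [posF, remF]
  | cons x xs ih =>
    by_cases h : x = c <;> simp [posF, remF, h]
    omega

theorem gDel_step (c : Char) (ks : List Char) (rest : List Char) :
    gDel rest (c :: ks) =
      (remF c rest).take (posF c rest) ++ gDel ((remF c rest).drop (posF c rest)) ks := by
  induction rest with
  | nil => simp [gDel_nil, posF, remF, gDel]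
  | cons x xs ih =>
    by_cases h : x = c
    · simp [gDel, posF, remF, h]
    · simp [gDel, posF, remF, h, ih]

theorem innerA_eq (c : Char) (arr : List Char) :
    ∀ i f : Nat, i ≤ arr.length →
      solutionInnerA c arr i f =
        (arr.take i ++ remF c (arr.drop i), f + posF c (arr.drop i)) := by
  have H : ∀ n i f, arr.length - i ≤ n → i ≤ arr.length →
      solutionInnerA c arr i f =
        (arr.take i ++ remF c (arr.drop i), f + posF c (arr.drop i)) := by
    intro n
    induction n with
    | zero =>
      intro i f hn hi
      have hieq : i = arr.length := by omega
      rw [solutionInnerA]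
      simp [hieq, remF, posF]
    | succ n ih =>
      intro i f hn hi
      rw [solutionInnerA]
      by_cases h : i < arr.length
      · have hdrop : arr.drop i = arr[i] :: arr.drop (i + 1) :=
          List.drop_eq_getElem_cons h
        by_cases hc : arr[i] = c
        · rw [dif_pos h, if_pos hc, hdrop]
          simp [remF, posF, hc]
        · have hih := ih (i + 1) (f + 1) (by omega) (by omega)
          rw [dif_pos h, if_neg hc, hih, hdrop]
          simp only [remF, posF, if_neg hc, Prod.mk.injEq]
          constructor
          · have ht : List.take (i + 1) arr = List.take i arr ++ [arr[i]] := by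
              rw [List.take_add_one, List.getElem?_eq_getElem h]
              rfl
            rw [ht]
            simp only [List.append_assoc, List.singleton_append]
          · omega
      · have hieq : i = arr.length := by omega
        simp [hieq, remF, posF]
  intro i f hi
  exact H (arr.length - i) i f le_rfl hi

theorem foldA_eq (ks : List Char) :
    ∀ arr : List Char, ∀ flag : Nat, flag ≤ arr.length →
      (ks.foldl (fun (s : List Char × Nat) ch => solutionInnerA ch s.1 s.2 s.2) (arr, flag)).1
        = arr.take flag ++ gDel (arr.drop flag) ks := by
  induction ks with
  | nil => intro arr flag h; simp [gDel, List.take_append_drop]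
  | cons c ks ih =>
    intro arr flag h
    simp only [List.foldl_cons]
    rw [innerA_eq c arr flag flag h]
    have hkeep : (arr.take flag).length = flag := by simp; omega
    set keep := arr.take flag with hk
    set rest := arr.drop flag with hr
    have hle : flag + posF c rest ≤ (keep ++ remF c rest).length := by
      have := posF_le c rest
      simp [hkeep]; omega
    rw [ih (keep ++ remF c rest) (flag + posF c rest) hle]
    have htake : (keep ++ remF c rest).take (flag + posF c rest)
        = keep ++ (remF c rest).take (posF c rest) := by
      rw [← hkeep, List.take_append]
      have h1 : List.take (keep.length + posF c rest) keep = keep :=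
        List.take_of_length_le (by omega)
      rw [h1]
      have h2 : keep.length + posF c rest - keep.length = posF c rest := by omega
      rw [h2]
    have hdrop : (keep ++ remF c rest).drop (flag + posF c rest)
        = (remF c rest).drop (posF c rest) := by
      rw [← hkeep, List.drop_append]
      have h1 : List.drop (keep.length + posF c rest) keep = [] := by
        apply List.drop_eq_nil_of_le; omega
      rw [h1, List.nil_append]
      have h2 : keep.length + posF c rest - keep.length = posF c rest := by omega
      rw [h2]
    rw [htake, hdrop, gDel_step, List.append_assoc]

theorem foldB_eq (kl : List Char) (ms : List Char) :
    ∀ out : List Char, ∀ j : Nat, j ≤ kl.length →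
      (ms.foldl
        (fun (s : List Char × Nat) c =>
          if s.2 < kl.length ∧ c = kl.getD s.2 ' ' then (s.1, s.2 + 1)
          else (s.1 ++ [c], s.2)) (out, j)).1
        = out ++ gDel ms (kl.drop j) := by
  induction ms with
  | nil => intro out j h; simp [gDel_nil]
  | cons c ms ih =>
    intro out j h
    simp only [List.foldl_cons]
    by_cases hj : j < kl.length
    · have hdrop : kl.drop j = kl[j] :: kl.drop (j + 1) := List.drop_eq_getElem_cons hj
      have hgetD : kl.getD j ' ' = kl[j] := by
        simp [List.getD, List.getElem?_eq_getElem hj]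
      by_cases hc : c = kl[j]
      · have hcond : j < kl.length ∧ c = kl.getD j ' ' := ⟨hj, by rw [hgetD]; exact hc⟩
        rw [if_pos hcond, ih out (j + 1) (by omega), hdrop]
        simp [gDel, hc]
      · have hcond : ¬ (j < kl.length ∧ c = kl.getD j ' ') := by
          rw [hgetD]; tauto
        rw [if_neg hcond, ih (out ++ [c]) j (by omega), hdrop]
        simp [gDel, hc]
    · have hjeq : j = kl.length := by omega
      have hdrop : kl.drop j = [] := by simp [hjeq]
      have hcond : ¬ (j < kl.length ∧ c = kl.getD j ' ') := by tauto
      rw [if_neg hcond, ih (out ++ [c]) j h, hdrop]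
      simp [gDel]

theorem solution_eq_alt (m k : String) : solution m k = solution_alt m k := by
  have hA := foldA_eq k.toList m.toList 0 (Nat.zero_le _)
  have hB := foldB_eq k.toList m.toList [] 0 (Nat.zero_le _)
  simp only [List.take_zero, List.drop_zero, List.nil_append] at hA hB
  simp only [solution, solution_alt]
  rw [hA, hB]

-- ===== VERDICT (by name: the statement is the Claim_ definition above) =====
theorem solution_spec : Claim_equal_solution := by
  intro m k _
  unfold Spec_solution
  exact solution_eq_alt m k
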